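-- pv_equiv track=rewrite | github.com/hyoloui/Algorithm | 프로그래머스/0/181855. 문자열 묶기/문자열 묶기.py | solution
-- ===== SOURCE A (Python) =====
-- def solution(strArr):
--     length_groups = {}
--     for s in strArr:
--         length = len(s)
--         if length not in length_groups:
--             length_groups[length] = []
--         length_groups[length].append(s)
--
--     max_group_size = max(len(group) for group in length_groups.values())
--     return max_group_size
-- ===== SOURCE B (Python) =====
-- def solution(strArr):
--     lengths = sorted(len(s) for s in strArr)
--     runs = []
--     run = 0
--     prev = None
--     for L in lengths:
--         if L == prev:
--             run += 1
--         else: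
--             if run:
--                 runs.append(run)
--             run = 1
--             prev = L
--     if run:
--         runs.append(run)
--     return max(runs)
-- ===== Notes on version B (the rewrite author's own statement) =====
-- stated objective: alternative
-- what changed: Replaces the dict-of-groups (hash grouping, then max of group sizes) by sorting the lengths and a single linear run-length scan over the sorted list, taking the max of the run lengths.
import Mathlib
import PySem

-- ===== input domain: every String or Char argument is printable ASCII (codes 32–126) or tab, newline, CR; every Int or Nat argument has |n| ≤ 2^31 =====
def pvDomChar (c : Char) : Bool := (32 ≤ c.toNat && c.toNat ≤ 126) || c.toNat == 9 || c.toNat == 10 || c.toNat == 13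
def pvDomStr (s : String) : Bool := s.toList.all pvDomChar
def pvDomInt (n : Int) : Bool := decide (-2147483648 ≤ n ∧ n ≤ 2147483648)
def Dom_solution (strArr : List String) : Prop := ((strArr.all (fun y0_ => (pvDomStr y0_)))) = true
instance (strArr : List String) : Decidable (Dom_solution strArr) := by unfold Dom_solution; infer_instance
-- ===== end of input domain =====

-- B replaces A's dict-of-groups (group strings by length, then max of group sizes) by sorting
-- the lengths and one linear run-length scan over them (alternative strategy, not claimed faster).

-- ===== PORT A =====
def solution (strArr : List String) : Int :=
  let lengthGroups := strArr.foldl (fun (d : PySem.Dict Int (List String)) s =>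
      let length := PySem.Str.len s
      let d := if d.contains length = false then d.insert length ([] : List String) else d
      d.modify length [] (fun g => g ++ [s])) PySem.Dict.empty
  (PySem.List.max? (lengthGroups.values.map (fun g => (g.length : Int))) (fun x => x)).getD 0

-- ===== PORT B =====
-- loop body of B's single scan over the sorted lengths: state = (runs, run, prev)
def bStep (st : List Int × Int × Option Int) (L : Int) : List Int × Int × Option Int :=
  match st with
  | (runs, run, prev) =>
    if some L = prev then (runs, run + 1, prev)
    else ((if run ≠ 0 then runs ++ [run] else runs), 1, some L)

-- after the loop: `if run: runs.append(run)`
def bFinal (st : List Int × Int × Option Int) : List Int :=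
  match st with
  | (runs, run, _) => if run ≠ 0 then runs ++ [run] else runs

def solution_alt (strArr : List String) : Int :=
  let lengths := PySem.List.sorted (strArr.map (fun s => PySem.Str.len s)) (fun x => x) false
  let st := lengths.foldl bStep ([], 0, none)
  (PySem.List.max? (bFinal st) (fun x => x)).getD 0

-- ===== PRECONDITION & SPEC =====
-- Pre_ excludes only the empty list, on which A's max() raises ValueError (B's does too).
def Pre_solution (strArr : List String) : Prop := strArr ≠ []
instance (strArr : List String) : Decidable (Pre_solution strArr) := by unfold Pre_solution; infer_instance
def pvWitness_solution : List String := (["a"])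

def Spec_solution (strArr : List String) (out : Int) : Prop := out = solution_alt strArr
instance (strArr : List String) (out : Int) : Decidable (Spec_solution strArr out) := by unfold Spec_solution; infer_instance

-- ===== CLAIM (what is proved, stated in full; the proofs are below) =====
def Claim_equal_solution : Prop := ∀ (strArr : List String), Dom_solution strArr → Pre_solution strArr → Spec_solution strArr (solution strArr)

-- ===== LEMMAS AND PROOFS =====

-- run lengths of (replicate run a ++ ys), written as B's scan computes them
def gRuns (a : Int) (run : Int) : List Int → List Int
  | [] => [run]
  | y :: ys => if y = a then gRuns a (run + 1) ys else run :: gRuns y 1 ys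

-- B's scan, once started, computes gRuns
theorem bScan_eq_gRuns (ys : List Int) : ∀ (runs : List Int) (run a : Int), 0 < run →
    bFinal (ys.foldl bStep (runs, run, some a)) = runs ++ gRuns a run ys := by
  induction ys with
  | nil => intro runs run a h; simp [bFinal, gRuns]; intro h'; omega
  | cons y ys ih =>
    intro runs run a h
    by_cases hy : y = a
    · subst hy
      simp only [List.foldl_cons, bStep, gRuns]
      exact ih runs (run + 1) y (by omega)
    · simp only [List.foldl_cons, bStep, gRuns]
      rw [if_neg (by simp [hy]), if_neg hy, if_pos (by omega : run ≠ 0),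
        ih (runs ++ [run]) 1 y (by omega)]
      simp

-- folding PySem.Set.add from a non-empty seed keeps the seed and appends the new distinct values
theorem setFold_add_seed (l : List Int) : ∀ (s : List Int),
    l.foldl PySem.Set.add s = s ++ (PySem.Set.ofList l).filter (fun y => !s.contains y) := by
  induction l with
  | nil => intro s; simp [PySem.Set.ofList]
  | cons x l ih =>
    intro s
    have hof : PySem.Set.ofList (x :: l) = [x] ++ (PySem.Set.ofList l).filter (fun y => !List.contains [x] y) := by
      show List.foldl PySem.Set.add (PySem.Set.add PySem.Set.empty x) l = _
      have : PySem.Set.add PySem.Set.empty x = [x] := by simp [PySem.Set.add, PySem.Set.empty, PySem.Set.contains]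
      rw [this, ih [x]]
    simp only [List.foldl_cons]
    rw [ih (PySem.Set.add s x), hof]
    by_cases hx : x ∈ s
    · have hadd : PySem.Set.add s x = s := by
        simp only [PySem.Set.add, PySem.Set.contains]
        rw [if_pos (by simpa using hx)]
      rw [hadd]
      simp only [List.filter_append, List.filter_filter]
      have h1 : List.filter (fun y => !s.contains y) [x] = [] := by simp [hx]
      rw [h1, List.nil_append]
      congr 1
      apply List.filter_congr
      intro y _
      by_cases hys : y ∈ s
      · simp [hys]
      · have : y ≠ x := by rintro rfl; exact hys hx
        simp [hys, this]
    · have hadd : PySem.Set.add s x = s ++ [x] := by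
        simp only [PySem.Set.add, PySem.Set.contains]
        rw [if_neg (by simpa using hx)]
      rw [hadd]
      simp only [List.filter_append, List.filter_filter, List.append_assoc]
      congr 1
      have h1 : List.filter (fun y => !s.contains y) [x] = [x] := by simp [hx]
      rw [h1]
      congr 1
      apply List.filter_congr
      intro y _
      by_cases hys : y ∈ s
      · simp [hys]
      · by_cases hyx : y = x <;> simp [hys, hyx]

-- first-occurrence dedup, cons form
theorem dedup_cons (x : Int) (l : List Int) :
    PySem.List.dedup (x :: l) = x :: (PySem.List.dedup l).filter (fun y => y != x) := by
  rw [PySem.List.dedup_eq_ofList]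
  show List.foldl PySem.Set.add (PySem.Set.add PySem.Set.empty x) l = _
  have : PySem.Set.add PySem.Set.empty x = [x] := by simp [PySem.Set.add, PySem.Set.empty, PySem.Set.contains]
  rw [this, setFold_add_seed l [x], PySem.List.dedup_eq_ofList]
  simp only [List.singleton_append, List.cons.injEq, true_and]
  apply List.filter_congr
  intro y _
  by_cases hyx : y = x <;> simp [hyx]

-- dropping a head that the filter excludes does not change the mapped counts
theorem count_map_filter_ne (y : Int) (ys l : List Int) :
    (l.filter (fun k => k != y)).map (fun k => (((y :: ys).count k : Nat) : Int)) =
      (l.filter (fun k => k != y)).map (fun k => ((ys.count k : Nat) : Int)) := by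
  apply List.map_congr_left
  intro k hk
  have : k ≠ y := by simpa using (List.mem_filter.mp hk).2
  have h2 : y ≠ k := Ne.symm this
  simp [h2]

theorem dedup_cons_map_count (y : Int) (ys : List Int) :
    (PySem.List.dedup (y :: ys)).map (fun k => (((y :: ys).count k : Nat) : Int)) =
      (1 + (ys.count y : Int)) ::
        ((PySem.List.dedup ys).filter (fun k => k != y)).map (fun k => ((ys.count k : Nat) : Int)) := by
  rw [dedup_cons]
  simp only [List.map_cons, List.count_cons_self]
  congr 1
  · push_cast; ring
  · exact count_map_filter_ne y ys _

-- on a sorted tail, gRuns lists the multiplicities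
theorem gRuns_eq_counts (ys : List Int) : ∀ (a n : Int),
    ys.Pairwise (· ≤ ·) → (∀ y ∈ ys, a ≤ y) →
    gRuns a n ys = (n + (ys.count a : Int)) ::
      ((PySem.List.dedup ys).filter (fun k => k != a)).map (fun k => ((ys.count k : Nat) : Int)) := by
  induction ys with
  | nil => intro a n _ _; simp [gRuns, PySem.List.dedup, PySem.Set.ofList]
  | cons z ys ih =>
    intro a n hp hle
    have hzle : ∀ y ∈ ys, z ≤ y := fun y hy => (List.pairwise_cons.mp hp).1 y hy
    have hp' : ys.Pairwise (· ≤ ·) := (List.pairwise_cons.mp hp).2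
    by_cases hz : z = a
    · subst hz
      simp only [gRuns]
      rw [ih z (n + 1) hp' hzle, dedup_cons]
      simp only [List.count_cons_self, List.filter_cons]
      have : (z != z) = false := by simp
      rw [this]
      simp only [Bool.false_eq_true, if_false, List.filter_filter, if_true]
      have hf : (PySem.List.dedup ys).filter (fun a => a != z && a != z)
          = (PySem.List.dedup ys).filter (fun k => k != z) := by simp
      rw [hf, count_map_filter_ne z ys]
      congr 1
      push_cast; ring
    · have haz : a < z := lt_of_le_of_ne (hle z (by simp)) (Ne.symm hz)
      have hanotin : a ∉ z :: ys := by
        intro hmem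
        rcases List.mem_cons.mp hmem with h | h
        · exact hz h.symm
        · exact absurd (hzle a h) (by omega)
      simp only [gRuns, if_neg hz]
      rw [ih z 1 hp' hzle]
      have hcnt0 : (z :: ys).count a = 0 := List.count_eq_zero.mpr hanotin
      have hfilter : (PySem.List.dedup (z :: ys)).filter (fun k => k != a) =
          PySem.List.dedup (z :: ys) := by
        apply List.filter_eq_self.mpr
        intro k hk
        have : k ∈ z :: ys := (PySem.List.mem_dedup _ _).mp hk
        have : k ≠ a := fun h => hanotin (h ▸ this)
        simpa using this
      rw [hcnt0, hfilter]
      rw [dedup_cons_map_count z ys]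
      congr 1
      omega

-- B's run list over a sorted list = multiplicities of its distinct values
theorem bRuns_eq_counts (ys : List Int) (hp : ys.Pairwise (· ≤ ·)) :
    bFinal (ys.foldl bStep ([], 0, none)) =
      (PySem.List.dedup ys).map (fun k => ((ys.count k : Nat) : Int)) := by
  cases ys with
  | nil => simp [bFinal, PySem.List.dedup, PySem.Set.ofList]
  | cons y ys =>
    have hstep : bStep ([], 0, none) y = ([], 1, some y) := by
      simp [bStep]
    rw [List.foldl_cons, hstep,
      bScan_eq_gRuns ys [] 1 y (by omega), List.nil_append,
      gRuns_eq_counts ys y 1 (List.pairwise_cons.mp hp).2 (List.pairwise_cons.mp hp).1,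
      dedup_cons_map_count y ys]

-- max (with default) only depends on the list up to permutation
theorem maxD_perm (l1 l2 : List Int) (h : l1.Perm l2) :
    (PySem.List.max? l1 (fun x => x)).getD 0 = (PySem.List.max? l2 (fun x => x)).getD 0 := by
  rcases h1 : PySem.List.max? l1 (fun x => x) with _ | m1
  · have : l1 = [] := (PySem.List.max?_eq_none_iff _ _).mp h1
    subst this
    have : l2 = [] := h.nil_eq.symm
    subst this
    rfl
  · rcases h2 : PySem.List.max? l2 (fun x => x) with _ | m2
    · have : l2 = [] := (PySem.List.max?_eq_none_iff _ _).mp h2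
      subst this
      rw [h.eq_nil] at h1
      rw [(PySem.List.max?_eq_none_iff ([] : List Int) (fun x => x)).mpr rfl] at h1
      cases h1
    · have hm1 : m1 ∈ l2 := h.mem_iff.mp (PySem.List.max?_mem h1)
      have hm2 : m2 ∈ l1 := h.mem_iff.mpr (PySem.List.max?_mem h2)
      have h12 : m1 ≤ m2 := PySem.List.max?_isMax h2 m1 hm1
      have h21 : m2 ≤ m1 := PySem.List.max?_isMax h1 m2 hm2
      simp [le_antisymm h12 h21]

-- A's conditional-insert-then-append step is a plain modify
theorem stepA_eq_modify (d : PySem.Dict Int (List String)) (k : Int) (s : String) :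
    (if d.contains k = false then d.insert k ([] : List String) else d).modify k []
        (fun g => g ++ [s]) = d.modify k [] (fun g => g ++ [s]) := by
  by_cases hc : d.contains k
  · simp [hc]
  · have hc' : d.contains k = false := by simpa using hc
    rw [if_pos hc']
    show (d.insert k []).insert k ((fun g => g ++ [s]) ((d.insert k []).getD k [])) = _
    rw [PySem.Dict.getD_insert_self]
    show (d.insert k []).insert k [s] = d.insert k ((fun g => g ++ [s]) (d.getD k []))
    rw [PySem.Dict.getD_of_not_contains d [] hc']
    apply PySem.Dict.ext
    rw [PySem.Dict.items_insert_of_contains _ _ (PySem.Dict.contains_insert_self d k []),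
      PySem.Dict.items_insert_of_not_contains _ _ hc',
      PySem.Dict.items_insert_of_not_contains _ _ hc']
    rw [List.map_append]
    have hmap : d.items.map (fun p => if (p.1 == k) = true then (k, [s]) else p) = d.items := by
      apply List.map_congr_left ?_ |>.trans (List.map_id _)
      intro p hp
      have hpk : p.1 ≠ k := by
        intro h
        have : p.1 ∈ d.keys := PySem.Dict.mem_keys_of_mem_items d hp
        rw [h] at this
        exact absurd ((PySem.Dict.contains_iff_mem_keys d k).mpr this) (by simp [hc'])
      simp [hpk]
    rw [hmap]
    simp

-- A's value = max multiplicity among the distinct lengths (first-occurrence order)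
theorem solution_eq_counts (strArr : List String) :
    solution strArr =
      (PySem.List.max? ((PySem.List.dedup (strArr.map PySem.Str.len)).map
          (fun k => (((strArr.map PySem.Str.len).count k : Nat) : Int))) (fun x => x)).getD 0 := by
  have hfun : (fun (d : PySem.Dict Int (List String)) s =>
      let length := PySem.Str.len s
      let d := if d.contains length = false then d.insert length ([] : List String) else d
      d.modify length [] (fun g => g ++ [s])) =
      (fun (d : PySem.Dict Int (List String)) s =>
        d.modify (PySem.Str.len s) [] (fun g => g ++ [s])) := by
    funext d s
    exact stepA_eq_modify d (PySem.Str.len s) s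
  simp only [solution]
  rw [hfun]
  set d0 := strArr.foldl (fun (d : PySem.Dict Int (List String)) s =>
      d.modify (PySem.Str.len s) [] (fun g => g ++ [s])) PySem.Dict.empty with hd0
  -- keys of d0
  have hkeys : d0.keys = PySem.List.dedup (strArr.map PySem.Str.len) := by
    rw [hd0, PySem.Dict.keys_foldl_modify_key strArr (fun s => PySem.Str.len s) []
      (fun _ s => fun g => g ++ [s]) PySem.Dict.empty]
    rw [PySem.Dict.keys_empty, PySem.List.dedup_eq_ofList]
    rfl
  have hnodup : d0.keys.Nodup := by
    rw [hkeys]; exact PySem.List.nodup_dedup _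
  -- getD of d0
  have hgetD : ∀ k : Int, d0.getD k [] =
      ((strArr.map (fun s => (PySem.Str.len s, s))).filter (fun p => p.1 == k)).map (fun p => p.2) := by
    intro k
    have : d0 = (strArr.map (fun s => (PySem.Str.len s, s))).foldl
        (fun d p => d.modify p.1 [] (fun g => g ++ [p.2])) PySem.Dict.empty := by
      rw [hd0, List.foldl_map]
    rw [this, PySem.Dict.getD_foldl_modify_append, PySem.Dict.getD_empty]
    simp
  -- values of d0 as a map over the keys
  have hvalues : d0.values = d0.keys.map (fun k => d0.getD k []) := by
    show d0.items.map (fun p => p.2) = _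
    have hk : d0.keys = d0.items.map (fun p => p.1) := rfl
    rw [hk, List.map_map]
    apply List.map_congr_left
    intro p hp
    have : d0.getD p.1 [] = p.2 := PySem.Dict.getD_of_mem_items d0 (by simpa using hp) hnodup []
    simp [Function.comp, this]
  rw [hvalues, List.map_map, hkeys]
  congr 2
  apply List.map_congr_left
  intro k _
  simp only [Function.comp]
  rw [hgetD k]
  rw [List.length_map, List.filter_map, List.length_map]
  norm_cast
  simp only [List.count, List.countP_map, ← List.countP_eq_length_filter]
  apply List.countP_congr
  intro s _
  simp [Function.comp, PySem.Str.len]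

-- ===== VERDICT (by name: the statement is the Claim_ definition above) =====
theorem solution_spec : Claim_equal_solution := by
  intro strArr _ _
  unfold Spec_solution
  simp only [solution_alt]
  rw [bRuns_eq_counts _ (PySem.List.sorted_pairwise _ _), solution_eq_counts]
  have hperm : (PySem.List.sorted (strArr.map (fun s => PySem.Str.len s)) (fun x => x) false).Perm
      (strArr.map (fun s => PySem.Str.len s)) :=
    PySem.List.sorted_perm _ _ false
  have hc : (fun k : Int => (((PySem.List.sorted (strArr.map (fun s => PySem.Str.len s)) (fun x => x) false).count k : Nat) : Int)) =
      (fun k : Int => (((strArr.map (fun s => PySem.Str.len s)).count k : Nat) : Int)) :=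
    funext fun k => by rw [hperm.count_eq]
  rw [hc]
  have hd : (PySem.List.dedup (strArr.map PySem.Str.len)).Perm
      (PySem.List.dedup (PySem.List.sorted (strArr.map (fun s => PySem.Str.len s)) (fun x => x) false)) := by
    refine (List.perm_ext_iff_of_nodup (PySem.List.nodup_dedup _) (PySem.List.nodup_dedup _)).mpr ?_
    intro a
    rw [PySem.List.mem_dedup, PySem.List.mem_dedup, hperm.mem_iff]
  exact maxD_perm _ _ (hd.map _)
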